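-- pv_equiv track=rewrite | github.com/neurostuff/pondie | information_extraction/prompting.py | _build_example_output
-- ===== SOURCE A (Python) =====
-- from typing import Any
--
-- def _build_example_output(
--     fields: list[str],
--     attributes: dict[str, Any],
-- ) -> dict[str, Any]:
--     item = {field: None for field in fields}
--     for key, value in (attributes or {}).items():
--         if key not in item:
--             continue
--         item[key] = value
--     return {"items": [item]}
-- ===== SOURCE B (Python) =====
-- def _build_example_output(fields, attributes):
--     attrs = attributes or {}
--     pairs = []
--     seen = set()
--     for field in fields:
--         if field in seen:
--             continue
--         seen.add(field)
--         pairs.append((field, attrs.get(field)))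
--     return {"items": [dict(pairs)]}
-- ===== Notes on version B (the rewrite author's own statement) =====
-- stated objective: alternative
-- what changed: B replaces A's two dict-mutation passes (seed every field with None, then overwrite from attributes under a membership guard) by one pass over fields with an explicit seen-set that appends (field, attrs.get(field)) pairs to a plain list, turned into a dict only at the end.
import Mathlib
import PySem

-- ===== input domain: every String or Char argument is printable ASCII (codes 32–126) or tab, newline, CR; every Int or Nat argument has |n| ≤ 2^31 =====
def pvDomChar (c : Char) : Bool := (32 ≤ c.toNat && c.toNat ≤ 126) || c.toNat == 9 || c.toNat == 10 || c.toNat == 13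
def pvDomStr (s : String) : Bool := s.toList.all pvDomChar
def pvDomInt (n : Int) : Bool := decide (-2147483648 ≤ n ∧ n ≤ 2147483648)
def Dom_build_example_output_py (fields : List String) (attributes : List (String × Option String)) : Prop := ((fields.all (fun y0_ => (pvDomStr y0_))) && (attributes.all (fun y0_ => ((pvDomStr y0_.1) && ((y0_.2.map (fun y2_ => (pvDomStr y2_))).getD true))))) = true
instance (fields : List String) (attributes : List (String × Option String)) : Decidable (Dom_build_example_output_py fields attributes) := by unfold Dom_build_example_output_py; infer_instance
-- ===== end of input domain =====

-- B replaces A's two dict-mutation passes (seed all fields with None, then overwrite from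
-- attributes under a membership guard) by ONE pass over fields with an explicit seen-set that
-- appends (field, attrs.get(field)) pairs to a plain list, made a dict at the end (alternative).

-- ===== PORT A =====
def build_example_output_py (fields : List String) (attributes : List (String × Option String)) : List (String × List (List (String × Option String))) :=
  -- item = {field: None for field in fields}
  let item : PySem.Dict String (Option String) :=
    fields.foldl (fun d field => d.insert field none) PySem.Dict.empty
  -- for key, value in (attributes or {}).items(): if key not in item: continue; item[key] = value
  let item :=
    attributes.foldl (fun d kv => if d.contains kv.1 = false then d else d.insert kv.1 kv.2) item
  [("items", [item.items])]

-- ===== PORT B =====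
def build_example_output_py_alt (fields : List String) (attributes : List (String × Option String)) : List (String × List (List (String × Option String))) :=
  -- attrs = attributes or {}
  let attrs : PySem.Dict String (Option String) := PySem.Dict.ofList attributes
  -- pairs = []; seen = set(); for field in fields: if field in seen: continue;
  --   seen.add(field); pairs.append((field, attrs.get(field)))
  let st : PySem.Set String × List (String × Option String) :=
    fields.foldl
      (fun st field =>
        if PySem.Set.contains st.1 field then st
        else (PySem.Set.add st.1 field, st.2 ++ [(field, attrs.getD field none)]))
      (PySem.Set.empty, [])
  -- return {"items": [dict(pairs)]}
  [("items", [(PySem.Dict.ofList st.2).items])]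

-- ===== PRECONDITION & SPEC =====
def Spec_build_example_output_py (fields : List String) (attributes : List (String × Option String)) (out : List (String × List (List (String × Option String)))) : Prop := out = build_example_output_py_alt fields attributes
instance (fields : List String) (attributes : List (String × Option String)) (out : List (String × List (List (String × Option String)))) : Decidable (Spec_build_example_output_py fields attributes out) := by unfold Spec_build_example_output_py; infer_instance

-- ===== CLAIM (what is proved, stated in full; the proofs are below) =====
def Claim_equal_build_example_output_py : Prop := ∀ (fields : List String) (attributes : List (String × Option String)), Dom_build_example_output_py fields attributes → Spec_build_example_output_py fields attributes (build_example_output_py fields attributes)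

-- ===== LEMMAS AND PROOFS =====

-- A's guarded overwrite step never changes membership.
theorem contains_step (d : PySem.Dict String (Option String)) (a : String × Option String) (k : String) :
    (if d.contains a.1 = false then d else d.insert a.1 a.2).contains k = d.contains k := by
  by_cases h : d.contains a.1 = false
  · simp [h]
  · have h' : d.contains a.1 = true := by simpa using h
    simp only [h', Bool.true_eq_false, if_false, PySem.Dict.contains_insert]
    by_cases hk : k = a.1
    · subst hk; simp [h']
    · simp [hk]

-- Value of A's attributes-loop at any key, in terms of the dict built from the attributes list.
theorem getD_attr_fold (attrs : List (String × Option String)) (d : PySem.Dict String (Option String)) (k : String) :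
    (attrs.foldl (fun d kv => if d.contains kv.1 = false then d else d.insert kv.1 kv.2) d).getD k none
      = if d.contains k = true then ((PySem.Dict.ofList attrs).get? k).getD (d.getD k none) else d.getD k none := by
  have hdef : ∀ (l : List (String × Option String)),
      PySem.Dict.ofList l = l.foldl (fun d p => d.insert p.1 p.2) PySem.Dict.empty := fun _ => rfl
  have hofl : ∀ (l : List (String × Option String)) (e : PySem.Dict String (Option String)) (k' : String),
      (l.foldl (fun d p => d.insert p.1 p.2) e).get? k'
        = ((l.foldl (fun d p => d.insert p.1 p.2) PySem.Dict.empty).get? k').orElse (fun _ => e.get? k') := by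
    intro l
    induction l with
    | nil => intro e k'; simp [PySem.Dict.get?_empty, Option.orElse]
    | cons b bs ihb =>
      intro e k'
      simp only [List.foldl_cons]
      rw [ihb, ihb (PySem.Dict.empty.insert b.1 b.2)]
      rw [PySem.Dict.get?_insert, PySem.Dict.get?_insert, PySem.Dict.get?_empty]
      cases hx : ((bs.foldl (fun d p => d.insert p.1 p.2) PySem.Dict.empty).get? k') <;>
        by_cases hk : k' = b.1 <;> simp [hk, Option.orElse]
  simp only [hdef]
  induction attrs generalizing d with
  | nil =>
    cases hc : d.contains k <;> simp [PySem.Dict.get?_empty]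
  | cons a as ih =>
    simp only [List.foldl_cons]
    rw [ih, contains_step, hofl as (PySem.Dict.empty.insert a.1 a.2) k]
    by_cases hc : d.contains k = true
    · rw [if_pos hc, if_pos hc]
      cases hx : ((as.foldl (fun d p => d.insert p.1 p.2) PySem.Dict.empty).get? k) with
      | some w => simp [Option.orElse]
      | none =>
        simp only [Option.orElse, PySem.Dict.get?_insert, PySem.Dict.get?_empty, Option.getD]
        by_cases hk : k = a.1
        · have ha' : ¬ (d.contains a.1 = false) := by rw [← hk]; simp [hc]
          simp [ha', hk]
        · by_cases hb : d.contains a.1 = false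
          · simp [hb, hk]
          · simp [hb, hk, PySem.Dict.getD_insert]
    · rw [if_neg hc, if_neg hc]
      by_cases hb : d.contains a.1 = false
      · simp [hb]
      · have hk : ¬ k = a.1 := by intro h; rw [h] at hc; simp at hb; simp [hb] at hc
        simp [hb, PySem.Dict.getD_insert, hk]

-- Value of a field-loop that inserts v(field) for each field, at any key.
theorem getD_field_fold (v : String → Option String) (fields : List String) (d : PySem.Dict String (Option String)) (k : String) :
    (fields.foldl (fun d f => d.insert f (v f)) d).getD k none
      = if k ∈ fields then v k else d.getD k none := by
  induction fields generalizing d with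
  | nil => simp
  | cons f fs ih =>
    simp only [List.foldl_cons]
    rw [ih]
    by_cases h1 : k ∈ fs
    · simp [h1]
    · by_cases h2 : k = f
      · subst h2; simp [h1]
      · simp [h1, h2, PySem.Dict.getD_insert, List.mem_cons]

-- A's attributes-loop never changes the key list.
theorem keys_attr_fold (attrs : List (String × Option String)) (d : PySem.Dict String (Option String)) :
    (attrs.foldl (fun d kv => if d.contains kv.1 = false then d else d.insert kv.1 kv.2) d).keys = d.keys := by
  induction attrs generalizing d with
  | nil => rfl
  | cons a as ih =>
    simp only [List.foldl_cons]
    rw [ih]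
    by_cases h : d.contains a.1 = false
    · simp [h]
    · simp only [h]
      exact PySem.Dict.keys_insert_of_contains d a.2 (by simpa using h)

-- The key list of any insert-loop over fields from empty is the ordered set of fields.
theorem keys_field_fold (v : String → Option String) (fields : List String) :
    (fields.foldl (fun d f => d.insert f (v f)) (PySem.Dict.empty : PySem.Dict String (Option String))).keys
      = PySem.Set.ofList fields := by
  rw [PySem.Dict.keys_foldl_insert (f := fun _ f => v f)]
  simp [PySem.Dict.keys_empty, PySem.Set.update_nil_left]

-- A's side: the items of A's final dict are the deduped fields paired with their attribute lookups.
theorem itemsA_eq (fields : List String) (attributes : List (String × Option String)) :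
    (attributes.foldl (fun d kv => if d.contains kv.1 = false then d else d.insert kv.1 kv.2)
        (fields.foldl (fun d field => d.insert field none) (PySem.Dict.empty : PySem.Dict String (Option String)))).items
      = (PySem.Set.ofList fields).map
          (fun k => (k, (PySem.Dict.ofList attributes).getD k none)) := by
  set dA := fields.foldl (fun d field => d.insert field none) (PySem.Dict.empty : PySem.Dict String (Option String)) with hdA
  set itemA := attributes.foldl (fun d kv => if d.contains kv.1 = false then d else d.insert kv.1 kv.2) dA with hA
  have hkA : itemA.keys = PySem.Set.ofList fields := by
    rw [hA, keys_attr_fold, hdA, keys_field_fold (fun _ => none)]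
  have hndA : itemA.keys.Nodup := by rw [hkA]; exact PySem.Set.nodup_ofList fields
  rw [PySem.Dict.items_eq_map_keys itemA hndA none, hkA]
  apply List.map_congr_left
  intro k hk
  have hkf : k ∈ fields := (PySem.Set.mem_ofList fields k).mp hk
  have hseedD : dA.getD k none = none := by
    rw [hdA, getD_field_fold (fun _ => none) fields PySem.Dict.empty k, if_pos hkf]
  have hseedC : dA.contains k = true := by
    rw [PySem.Dict.contains_eq_decide_mem_keys, hdA, keys_field_fold (fun _ => none)]
    simp [PySem.Set.mem_ofList, hkf]
  rw [hA, getD_attr_fold, hseedC, if_pos rfl, hseedD, ← PySem.Dict.getD_eq_get?_getD]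

-- B's side: the seen-set loop, started from a consistent state, ends in a consistent state.
theorem seen_fold (g : String → Option String) (fields : List String) (s : PySem.Set String) :
    fields.foldl
        (fun st field =>
          if PySem.Set.contains st.1 field then st
          else (PySem.Set.add st.1 field, st.2 ++ [(field, g field)]))
        (s, s.map (fun k => (k, g k)))
      = (PySem.Set.update s fields, (PySem.Set.update s fields).map (fun k => (k, g k))) := by
  induction fields generalizing s with
  | nil => simp [PySem.Set.update]
  | cons f fs ih =>
    simp only [List.foldl_cons, PySem.Set.update_cons]
    by_cases h : PySem.Set.contains s f = true
    · have hm : f ∈ s := by simpa using h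
      have hadd : PySem.Set.add s f = s := by simp [PySem.Set.add, hm]
      rw [if_pos h, show (s, s.map (fun k => (k, g k)))
            = (PySem.Set.add s f, (PySem.Set.add s f).map (fun k => (k, g k))) from by rw [hadd]]
      exact ih (PySem.Set.add s f)
    · have hm : f ∉ s := by simpa using h
      have hadd : PySem.Set.add s f = s ++ [f] := by simp [PySem.Set.add, hm]
      rw [if_neg h, show s.map (fun k => (k, g k)) ++ [(f, g f)]
            = (PySem.Set.add s f).map (fun k => (k, g k)) from by simp [hadd]]
      exact ih (PySem.Set.add s f)

-- dict(pairs) has exactly the pairs as items when the keys are distinct.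
theorem items_ofList_nodup (pairs : List (String × Option String)) (h : (pairs.map Prod.fst).Nodup) :
    (PySem.Dict.ofList pairs).items = pairs := by
  have := PySem.Dict.items_foldl_insert_fresh (l := pairs) (k := Prod.fst) (v := Prod.snd)
    (d := (PySem.Dict.empty : PySem.Dict String (Option String)))
    (by intro a _; simp [PySem.Dict.contains_empty]) h
  simpa [PySem.Dict.ofList, PySem.Dict.items] using this

-- ===== VERDICT (by name: the statement is the Claim_ definition above) =====
theorem build_example_output_py_spec : Claim_equal_build_example_output_py := by
  intro fields attributes _
  show build_example_output_py fields attributes = build_example_output_py_alt fields attributes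
  simp only [build_example_output_py, build_example_output_py_alt, PySem.Set.empty]
  have hB := seen_fold (fun k => (PySem.Dict.ofList attributes).getD k none) fields []
  simp only [List.map_nil, PySem.Set.update_nil_left] at hB
  rw [hB]
  have hnd : (((PySem.Set.ofList fields).map
      (fun k => (k, (PySem.Dict.ofList attributes).getD k none))).map Prod.fst).Nodup := by
    rw [List.map_map,
      show (Prod.fst ∘ fun k : String => (k, (PySem.Dict.ofList attributes).getD k none)) = id from rfl,
      List.map_id]
    exact PySem.Set.nodup_ofList fields
  rw [show ((PySem.Set.ofList fields,
        (PySem.Set.ofList fields).map (fun k => (k, (PySem.Dict.ofList attributes).getD k none))).2)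
      = (PySem.Set.ofList fields).map (fun k => (k, (PySem.Dict.ofList attributes).getD k none)) from rfl]
  rw [items_ofList_nodup _ hnd, itemsA_eq]
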